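-- pv_equiv track=rewrite | github.com/bilal2134/Vendor-Contract-Compliance-Analyzer | backend/app/services/compliance_engine.py | _evaluate_disqualification_signals
-- ===== SOURCE A (Python) =====
-- def _evaluate_disqualification_signals(texts: list[str]) -> dict[str, bool]:
--     lowered = [text.lower() for text in texts]
--     return {
--         "ofac": any(
--             "ofac" in text and any(token in text for token in ["no designation", "no designations", "last screened", "no ofac"])
--             for text in lowered
--         ),
--         "eu": any(
--             "eu" in text and "sanctions" in text and any(token in text for token in ["no designation", "no designations", "no ofac, eu", "no "])
--             for text in lowered
--         ),
--         "export": any(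
--             token in text
--             for text in lowered
--             for token in ["ear/itar compliant", "export controls", "no itar-controlled products", "export control debarment"]
--         ),
--         "sam": any(
--             ("sam.gov" in text or "excluded parties" in text or "epls" in text)
--             and any(token in text for token in ["not listed", "no debarment", "excluded parties"])
--             for text in lowered
--         ),
--     }
-- ===== SOURCE B (Python) =====
-- # Data-driven DNF-rule engine: the four conditions are compiled once into clauses of
-- # required tokens (frozensets); each text yields a present-token set in one scan and a
-- # key fires iff some clause is a subset of that set; satisfied keys leave the pending
-- # list, and the scan stops early once nothing is pending.
-- _RULES = {
--     "ofac": [["ofac", s] for s in ["no designation", "no designations", "last screened", "no ofac"]],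
--     "eu": [["eu", "sanctions", s] for s in ["no designation", "no designations", "no ofac, eu", "no "]],
--     "export": [[s] for s in ["ear/itar compliant", "export controls", "no itar-controlled products", "export control debarment"]],
--     "sam": [[g, s] for g in ["sam.gov", "excluded parties", "epls"] for s in ["not listed", "no debarment", "excluded parties"]],
-- }
-- _TOKENS = list(dict.fromkeys(tok for clauses in _RULES.values() for clause in clauses for tok in clause))
-- _CLAUSES = {key: [frozenset(clause) for clause in clauses] for key, clauses in _RULES.items()}
--
--
-- def _evaluate_disqualification_signals(texts: list[str]) -> dict[str, bool]:
--     result = {key: False for key in _RULES}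
--     pending = [key for key in _RULES]
--     for text in texts:
--         if not pending:
--             break
--         t = text.lower()
--         present = frozenset(filter(t.__contains__, _TOKENS))
--         for key in pending:
--             if any(map(present.issuperset, _CLAUSES[key])):
--                 result[key] = True
--         pending = [key for key in pending if not result[key]]
--     return result
-- ===== Notes on version B (the rewrite author's own statement) =====
-- stated objective: alternative
-- what changed: Replaces A's four hard-coded any()-comprehensions with a data-driven rule engine: each key's condition is compiled once into DNF clauses of required tokens, each text yields a present-token set in one token scan, and a key fires iff some clause is a subset of that set.
import Mathlib
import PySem

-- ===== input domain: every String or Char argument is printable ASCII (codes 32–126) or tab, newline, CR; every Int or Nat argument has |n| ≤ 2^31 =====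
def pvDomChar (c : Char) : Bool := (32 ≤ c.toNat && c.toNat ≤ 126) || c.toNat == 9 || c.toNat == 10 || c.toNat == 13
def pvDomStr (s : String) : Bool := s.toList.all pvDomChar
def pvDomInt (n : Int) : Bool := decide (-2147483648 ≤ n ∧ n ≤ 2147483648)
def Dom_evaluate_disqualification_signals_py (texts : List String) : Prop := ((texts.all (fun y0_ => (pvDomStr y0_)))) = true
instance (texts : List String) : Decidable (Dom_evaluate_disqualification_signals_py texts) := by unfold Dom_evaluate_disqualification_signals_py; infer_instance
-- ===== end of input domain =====

-- B replaces A's four hard-coded any()-scans by a data-driven rule engine: rules compiled to DNF clauses of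
-- required tokens, a per-text present-token set, and a clause-subset test (alternative decomposition, same values).

-- ===== PORT A =====
def evaluate_disqualification_signals_py (texts : List String) : List (String × Bool) :=
  let lowered := texts.map PySem.Str.lower
  [("ofac", lowered.any (fun t =>
      PySem.Str.isIn "ofac" t &&
      (["no designation", "no designations", "last screened", "no ofac"].any (fun tok => PySem.Str.isIn tok t)))),
   ("eu", lowered.any (fun t =>
      PySem.Str.isIn "eu" t && PySem.Str.isIn "sanctions" t &&
      (["no designation", "no designations", "no ofac, eu", "no "].any (fun tok => PySem.Str.isIn tok t)))),
   ("export", lowered.any (fun t =>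
      ["ear/itar compliant", "export controls", "no itar-controlled products", "export control debarment"].any (fun tok => PySem.Str.isIn tok t))),
   ("sam", lowered.any (fun t =>
      (PySem.Str.isIn "sam.gov" t || PySem.Str.isIn "excluded parties" t || PySem.Str.isIn "epls" t) &&
      (["not listed", "no debarment", "excluded parties"].any (fun tok => PySem.Str.isIn tok t))))]

-- ===== PORT B =====
-- _RULES: each key mapped to its DNF clause list (a clause = the tokens that must all occur in one text)
def pvRules : List (String × List (List String)) :=
  [("ofac", ["no designation", "no designations", "last screened", "no ofac"].map (fun s => ["ofac", s])),
   ("eu", ["no designation", "no designations", "no ofac, eu", "no "].map (fun s => ["eu", "sanctions", s])),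
   ("export", ["ear/itar compliant", "export controls", "no itar-controlled products", "export control debarment"].map (fun s => [s])),
   ("sam", ["sam.gov", "excluded parties", "epls"].flatMap (fun g =>
      ["not listed", "no debarment", "excluded parties"].map (fun s => [g, s])))]

-- _TOKENS = list(dict.fromkeys(tok for clauses in _RULES.values() for clause in clauses for tok in clause))
def pvTokens : List String := PySem.List.dedup ((pvRules.map (·.2)).flatten.flatten)

-- _CLAUSES = {key: [frozenset(clause) for clause in clauses] for key, clauses in _RULES.items()}
def pvClauses : PySem.Dict String (List (PySem.Set String)) :=
  PySem.Dict.mk (pvRules.map (fun kv => (kv.1, kv.2.map (fun clause => PySem.Set.ofList clause))))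

-- the body of B's 'for text in texts' loop on the (result, pending) state
def pvStepB (st : PySem.Dict String Bool × List String) (text : String) :
    PySem.Dict String Bool × List String :=
  if st.2.isEmpty then st   -- 'break': nothing pending, the remaining texts leave the state unchanged
  else
    let t := PySem.Str.lower text
    let present : PySem.Set String := PySem.Set.ofList (pvTokens.filter (fun tok => PySem.Str.isIn tok t))
    let result := st.2.foldl (fun res key =>
        if (pvClauses.getD key []).any (fun clause => PySem.Set.issuperset present clause) then
          res.insert key true
        else res) st.1
    (result, st.2.filter (fun key => !(result.getD key false)))

def evaluate_disqualification_signals_py_alt (texts : List String) : List (String × Bool) :=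
  let result0 : PySem.Dict String Bool := pvRules.foldl (fun d kv => d.insert kv.1 false) PySem.Dict.empty
  let pending0 : List String := pvRules.map (·.1)
  let final := texts.foldl pvStepB (result0, pending0)
  final.1.items

-- ===== PRECONDITION & SPEC =====
def Spec_evaluate_disqualification_signals_py (texts : List String) (out : List (String × Bool)) : Prop := out = evaluate_disqualification_signals_py_alt texts
instance (texts : List String) (out : List (String × Bool)) : Decidable (Spec_evaluate_disqualification_signals_py texts out) := by unfold Spec_evaluate_disqualification_signals_py; infer_instance

-- ===== CLAIM (what is proved, stated in full; the proofs are below) =====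
def Claim_equal_evaluate_disqualification_signals_py : Prop := ∀ (texts : List String), Dom_evaluate_disqualification_signals_py texts → Spec_evaluate_disqualification_signals_py texts (evaluate_disqualification_signals_py texts)

-- ===== LEMMAS AND PROOFS =====

-- A's four per-text predicates, named for the proofs.
def pvPofac (t : String) : Bool :=
  PySem.Str.isIn "ofac" t &&
    (["no designation", "no designations", "last screened", "no ofac"].any (fun tok => PySem.Str.isIn tok t))
def pvPeu (t : String) : Bool :=
  PySem.Str.isIn "eu" t && PySem.Str.isIn "sanctions" t &&
    (["no designation", "no designations", "no ofac, eu", "no "].any (fun tok => PySem.Str.isIn tok t))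
def pvPexport (t : String) : Bool :=
  ["ear/itar compliant", "export controls", "no itar-controlled products", "export control debarment"].any (fun tok => PySem.Str.isIn tok t)
def pvPsam (t : String) : Bool :=
  (PySem.Str.isIn "sam.gov" t || PySem.Str.isIn "excluded parties" t || PySem.Str.isIn "epls" t) &&
    (["not listed", "no debarment", "excluded parties"].any (fun tok => PySem.Str.isIn tok t))

set_option maxRecDepth 10000 in
theorem pvTokens_eq : pvTokens = ["ofac", "no designation", "no designations", "last screened", "no ofac", "eu", "sanctions", "no ofac, eu", "no ", "ear/itar compliant", "export controls", "no itar-controlled products", "export control debarment", "sam.gov", "not listed", "no debarment", "excluded parties", "epls"] := by decide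

-- the pending list corresponding to a canonical flag state
def pvPending (a b c d : Bool) : List String :=
  (if a then [] else ["ofac"]) ++ (if b then [] else ["eu"]) ++
    (if c then [] else ["export"]) ++ (if d then [] else ["sam"])

-- the clause table with its frozensets evaluated
set_option maxRecDepth 10000 in
theorem pvClauses_eq : pvClauses = PySem.Dict.mk
    [("ofac", [["ofac", "no designation"], ["ofac", "no designations"], ["ofac", "last screened"], ["ofac", "no ofac"]]),
     ("eu", [["eu", "sanctions", "no designation"], ["eu", "sanctions", "no designations"], ["eu", "sanctions", "no ofac, eu"], ["eu", "sanctions", "no "]]),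
     ("export", [["ear/itar compliant"], ["export controls"], ["no itar-controlled products"], ["export control debarment"]]),
     ("sam", [["sam.gov", "not listed"], ["sam.gov", "no debarment"], ["sam.gov", "excluded parties"],
              ["excluded parties", "not listed"], ["excluded parties", "no debarment"], ["excluded parties"],
              ["epls", "not listed"], ["epls", "no debarment"], ["epls", "excluded parties"]])] := by decide

-- each key's clause test over the present set equals A's per-text predicate
set_option maxRecDepth 10000 in
theorem pvCond_ofac (t : String) :
    ((pvClauses.getD "ofac" []).any (fun clause =>
      PySem.Set.issuperset (PySem.Set.ofList (pvTokens.filter (fun tok => PySem.Str.isIn tok t))) clause)) = pvPofac t := by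
  simp [pvClauses_eq, PySem.Dict.getD, PySem.Dict.get?,
    PySem.Set.issuperset, PySem.Set.issubset, pvPofac, pvTokens_eq,
    Bool.and_or_distrib_left, Bool.and_or_distrib_right, Bool.or_assoc, Bool.and_self]
  try ac_rfl

set_option maxRecDepth 10000 in
theorem pvCond_eu (t : String) :
    ((pvClauses.getD "eu" []).any (fun clause =>
      PySem.Set.issuperset (PySem.Set.ofList (pvTokens.filter (fun tok => PySem.Str.isIn tok t))) clause)) = pvPeu t := by
  simp [pvClauses_eq, PySem.Dict.getD, PySem.Dict.get?,
    PySem.Set.issuperset, PySem.Set.issubset, pvPeu, pvTokens_eq,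
    Bool.and_or_distrib_left, Bool.and_or_distrib_right, Bool.or_assoc, Bool.and_self, Bool.and_assoc]
  try ac_rfl

set_option maxRecDepth 10000 in
theorem pvCond_export (t : String) :
    ((pvClauses.getD "export" []).any (fun clause =>
      PySem.Set.issuperset (PySem.Set.ofList (pvTokens.filter (fun tok => PySem.Str.isIn tok t))) clause)) = pvPexport t := by
  simp [pvClauses_eq, PySem.Dict.getD, PySem.Dict.get?,
    PySem.Set.issuperset, PySem.Set.issubset, pvPexport, pvTokens_eq,
    Bool.or_assoc]
  try ac_rfl

set_option maxRecDepth 10000 in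
theorem pvCond_sam (t : String) :
    ((pvClauses.getD "sam" []).any (fun clause =>
      PySem.Set.issuperset (PySem.Set.ofList (pvTokens.filter (fun tok => PySem.Str.isIn tok t))) clause)) = pvPsam t := by
  simp [pvClauses_eq, PySem.Dict.getD, PySem.Dict.get?,
    PySem.Set.issuperset, PySem.Set.issubset, pvPsam, pvTokens_eq,
    Bool.and_or_distrib_left, Bool.and_or_distrib_right, Bool.or_assoc, Bool.and_self]
  try ac_rfl

-- one step of B's outer fold on a canonical (dict, pending) state
set_option maxRecDepth 10000 in
set_option maxHeartbeats 1600000 in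
theorem pvStep_aux (text : String) (a b c d : Bool) :
    pvStepB (PySem.Dict.mk [("ofac", a), ("eu", b), ("export", c), ("sam", d)], pvPending a b c d) text
    = (PySem.Dict.mk [("ofac", a || pvPofac (PySem.Str.lower text)), ("eu", b || pvPeu (PySem.Str.lower text)),
        ("export", c || pvPexport (PySem.Str.lower text)), ("sam", d || pvPsam (PySem.Str.lower text))],
        pvPending (a || pvPofac (PySem.Str.lower text)) (b || pvPeu (PySem.Str.lower text))
          (c || pvPexport (PySem.Str.lower text)) (d || pvPsam (PySem.Str.lower text))) := by
  cases a <;> cases b <;> cases c <;> cases d <;>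
    simp only [pvStepB, pvPending, List.append_nil, List.nil_append, List.cons_append,
      List.isEmpty_cons, List.isEmpty_nil, Bool.false_eq_true, if_false, if_true,
      List.foldl_cons, List.foldl_nil, pvCond_ofac, pvCond_eu, pvCond_export, pvCond_sam] <;>
    cases hofac : pvPofac (PySem.Str.lower text) <;>
    cases heu : pvPeu (PySem.Str.lower text) <;>
    cases hexp : pvPexport (PySem.Str.lower text) <;>
    cases hsam : pvPsam (PySem.Str.lower text) <;>
    simp [PySem.Dict.insert, PySem.Dict.contains, PySem.Dict.getD, PySem.Dict.get?, pvPending]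

theorem pvFold_eq (texts : List String) (a b c d : Bool) :
    texts.foldl pvStepB
      (PySem.Dict.mk [("ofac", a), ("eu", b), ("export", c), ("sam", d)], pvPending a b c d)
    = (PySem.Dict.mk [("ofac", a || (texts.map PySem.Str.lower).any pvPofac),
        ("eu", b || (texts.map PySem.Str.lower).any pvPeu),
        ("export", c || (texts.map PySem.Str.lower).any pvPexport),
        ("sam", d || (texts.map PySem.Str.lower).any pvPsam)],
        pvPending (a || (texts.map PySem.Str.lower).any pvPofac)
          (b || (texts.map PySem.Str.lower).any pvPeu)
          (c || (texts.map PySem.Str.lower).any pvPexport)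
          (d || (texts.map PySem.Str.lower).any pvPsam)) := by
  induction texts generalizing a b c d with
  | nil => simp
  | cons x xs ih =>
    rw [List.foldl_cons, pvStep_aux x a b c d, ih]
    simp [Bool.or_assoc]

-- ===== VERDICT (by name: the statement is the Claim_ definition above) =====
theorem evaluate_disqualification_signals_py_spec : Claim_equal_evaluate_disqualification_signals_py := by
  intro texts _
  unfold Spec_evaluate_disqualification_signals_py evaluate_disqualification_signals_py evaluate_disqualification_signals_py_alt
  have h0 : (pvRules.foldl (fun d kv => d.insert kv.1 false) PySem.Dict.empty, pvRules.map (·.1))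
      = (PySem.Dict.mk [("ofac", false), ("eu", false), ("export", false), ("sam", false)],
          pvPending false false false false) := by rfl
  simp only [h0, pvFold_eq, Bool.false_or]
  rfl
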